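-- pv_equiv track=rewrite | github.com/PrateekPisat/CS6120-NLP | Assignment_1/question_3/util.py | _get_trigram_count
-- ===== SOURCE A (Python) =====
-- def _get_trigram_count(words, unk_words, count_dict):
--     trigrams = _generate_ngrams(words, 3)
--     for wi_2, wi_1, wi in trigrams:
--         if wi_1 in unk_words:
--             wi_1 = "<UNK>"
--         if wi_2 in unk_words:
--             wi_2 = "<UNK>"
--         if wi in unk_words:
--             wi = "<UNK>"
--         count_dict[(wi_1, wi_2)] = count_dict.get((wi_1, wi_2), dict())
--         count_dict[(wi_1, wi_2)][wi] = count_dict[(wi_1, wi_2)].get(wi, 0) + 1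
--     return count_dict
--
-- def _generate_ngrams(words_list, n):
--     ngrams_list = []
--     for num in range(0, len(words_list) - (n - 1)):
--         ngram = tuple(words_list[num: num + n])
--         ngrams_list.append(ngram)
--     return ngrams_list
-- ===== SOURCE B (Python) =====
-- def _get_trigram_count(words, unk_words, count_dict):
--     # Two-stage aggregation: count each distinct (substituted) trigram once into a
--     # frequency table, then merge the aggregated counts into count_dict in bulk.
--     # Mutates count_dict in place and returns it (same as A).
--     mapped = ["<UNK>" if w in unk_words else w for w in words]
--     freq = {}
--     for i in range(len(mapped) - 2):
--         key = (mapped[i + 1], mapped[i], mapped[i + 2])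
--         freq[key] = freq.get(key, 0) + 1
--     for (wi_1, wi_2, wi), c in freq.items():
--         inner = count_dict.setdefault((wi_1, wi_2), {})
--         inner[wi] = inner.get(wi, 0) + c
--     return count_dict
-- ===== Notes on version B (the rewrite author's own statement) =====
-- stated objective: alternative
-- what changed: B replaces A's per-trigram nested-dict increments with a two-stage aggregation: it first counts each distinct substituted trigram into a flat frequency dict keyed by the whole triple, then merges each aggregated count into count_dict with a single bulk += per distinct trigram.
import Mathlib
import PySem

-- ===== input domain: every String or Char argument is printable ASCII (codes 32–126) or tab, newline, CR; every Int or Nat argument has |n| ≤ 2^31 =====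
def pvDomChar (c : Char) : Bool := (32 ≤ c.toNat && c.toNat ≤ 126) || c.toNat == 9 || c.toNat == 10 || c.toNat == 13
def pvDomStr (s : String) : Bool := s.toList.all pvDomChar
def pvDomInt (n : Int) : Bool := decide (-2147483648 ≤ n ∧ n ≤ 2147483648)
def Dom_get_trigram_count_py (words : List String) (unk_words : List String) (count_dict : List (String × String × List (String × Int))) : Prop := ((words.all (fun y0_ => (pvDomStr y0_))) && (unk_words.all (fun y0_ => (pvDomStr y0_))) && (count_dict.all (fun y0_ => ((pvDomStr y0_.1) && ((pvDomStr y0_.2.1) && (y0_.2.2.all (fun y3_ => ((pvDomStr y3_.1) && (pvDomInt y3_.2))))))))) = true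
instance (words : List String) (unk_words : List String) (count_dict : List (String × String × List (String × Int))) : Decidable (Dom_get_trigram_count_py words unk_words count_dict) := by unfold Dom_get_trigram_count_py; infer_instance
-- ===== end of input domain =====

-- B aggregates: it first counts each distinct <UNK>-substituted trigram into a flat frequency
-- dict keyed by the whole triple, then merges each aggregated count into count_dict in one bulk
-- update per distinct trigram, instead of A's per-occurrence nested-dict increments (alternative
-- decomposition, similar cost). Both Pythons mutate count_dict in place; the equivalence proved
-- here is about the return value.


-- ===== PORT A =====
-- the two dict-update lines of A, on the association-list representation:
-- count_dict[(wi_1,wi_2)] = count_dict.get((wi_1,wi_2), dict()); count_dict[(wi_1,wi_2)][wi] += 1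
-- (dict setitem overwrites in place, appends if absent)
def pvInnerAdd (inner : List (String × Int)) (w : String) : List (String × Int) :=
  match inner with
  | [] => [(w, 1)]
  | (k, v) :: t => if k = w then (k, v + 1) :: t else (k, v) :: pvInnerAdd t w

def pvOuterUpd (d : List (String × String × List (String × Int))) (k1 k2 w : String) :
    List (String × String × List (String × Int)) :=
  match d with
  | [] => [(k1, k2, [(w, 1)])]
  | (a, b, inner) :: t =>
      if a = k1 ∧ b = k2 then (a, b, pvInnerAdd inner w) :: t
      else (a, b, inner) :: pvOuterUpd t k1 k2 w

def pvGenerateNgrams (words_list : List String) (n : Int) : List (List String) :=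
  (PySem.List.pyRange 0 ((words_list.length : Int) - (n - 1)) 1).foldl
    (fun acc num => acc ++ [PySem.List.slice words_list (some num) (some (num + n))]) []

def get_trigram_count_py (words : List String) (unk_words : List String)
    (count_dict : List (String × String × List (String × Int))) :
    List (String × String × List (String × Int)) :=
  (pvGenerateNgrams words 3).foldl
    (fun cd tri =>
      match tri with
      | [wi_2, wi_1, wi] =>
          let wi_1 := if wi_1 ∈ unk_words then "<UNK>" else wi_1
          let wi_2 := if wi_2 ∈ unk_words then "<UNK>" else wi_2
          let wi := if wi ∈ unk_words then "<UNK>" else wi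
          pvOuterUpd cd wi_1 wi_2 wi
      | _ => cd)  -- unreachable: every generated ngram has exactly 3 words
    count_dict

-- ===== PORT B =====
-- inner[wi] = inner.get(wi, 0) + c  (overwrite in place, append if absent)
def pvInnerAddN (inner : List (String × Int)) (w : String) (c : Int) : List (String × Int) :=
  match inner with
  | [] => [(w, c)]
  | (k, v) :: t => if k = w then (k, v + c) :: t else (k, v) :: pvInnerAddN t w c

-- inner = count_dict.setdefault((k1,k2), {}); inner[w] = inner.get(w, 0) + c
def pvOuterUpdN (d : List (String × String × List (String × Int))) (k1 k2 w : String) (c : Int) :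
    List (String × String × List (String × Int)) :=
  match d with
  | [] => [(k1, k2, [(w, c)])]
  | (a, b, inner) :: t =>
      if a = k1 ∧ b = k2 then (a, b, pvInnerAddN inner w c) :: t
      else (a, b, inner) :: pvOuterUpdN t k1 k2 w c

def get_trigram_count_py_alt (words : List String) (unk_words : List String)
    (count_dict : List (String × String × List (String × Int))) :
    List (String × String × List (String × Int)) :=
  let mapped := words.map (fun w => if w ∈ unk_words then "<UNK>" else w)
  -- first pass: freq[key] = freq.get(key, 0) + 1 over i in range(len(mapped) - 2);
  -- every index is in range, so pyGetD's default "" is never used — exact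
  let freq : PySem.Dict (String × String × String) Int :=
    (PySem.List.pyRange 0 ((mapped.length : Int) - 2) 1).foldl
      (fun d i =>
        let key := (PySem.List.pyGetD mapped (i + 1) "", PySem.List.pyGetD mapped i "",
                    PySem.List.pyGetD mapped (i + 2) "")
        d.insert key (d.getD key 0 + 1))
      PySem.Dict.empty
  -- second pass: merge aggregated counts, in freq's insertion order
  freq.items.foldl (fun cd p => pvOuterUpdN cd p.1.1 p.1.2.1 p.1.2.2 p.2) count_dict

-- ===== PRECONDITION & SPEC =====
def Spec_get_trigram_count_py (words : List String) (unk_words : List String) (count_dict : List (String × String × List (String × Int))) (out : List (String × String × List (String × Int))) : Prop := out = get_trigram_count_py_alt words unk_words count_dict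
instance (words : List String) (unk_words : List String) (count_dict : List (String × String × List (String × Int))) (out : List (String × String × List (String × Int))) : Decidable (Spec_get_trigram_count_py words unk_words count_dict out) := by unfold Spec_get_trigram_count_py; infer_instance

-- ===== CLAIM (what is proved, stated in full; the proofs are below) =====
def Claim_equal_get_trigram_count_py : Prop := ∀ (words : List String) (unk_words : List String) (count_dict : List (String × String × List (String × Int))), Dom_get_trigram_count_py words unk_words count_dict → Spec_get_trigram_count_py words unk_words count_dict (get_trigram_count_py words unk_words count_dict)


-- ===== LEMMAS AND PROOFS =====

-- the list of (wi_2, wi_1, wi) triples of consecutive words, and its key form (wi_1, wi_2, wi)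
def pvTriples {α : Type} (xs : List α) : List (α × α × α) :=
  xs.zip ((xs.drop 1).zip (xs.drop 2))

def pvTriKeys (m : List String) : List (String × String × String) :=
  (pvTriples m).map (fun t => (t.2.1, t.1, t.2.2))

-- 'first matching outer pair carries w in its inner list' (first-match, like dict lookup)
def pvHas (cd : List (String × String × List (String × Int))) (k : String × String × String) : Bool :=
  match cd with
  | [] => false
  | (a, b, inner) :: t =>
      if a = k.1 ∧ b = k.2.1 then inner.any (fun p => decide (p.1 = k.2.2)) else pvHas t k

-- the effect of freq[key] = freq.get(key,0)+1 on an items list (in-place bump or append)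
def pvBump (P : List ((String × String × String) × Int)) (x : String × String × String) :
    List ((String × String × String) × Int) :=
  match P with
  | [] => [(x, 1)]
  | (k, v) :: t => if k = x then (k, v + 1) :: t else (k, v) :: pvBump t x

theorem pv_innerAddN_one (inner : List (String × Int)) (w : String) :
    pvInnerAddN inner w 1 = pvInnerAdd inner w := by
  induction inner with
  | nil => rfl
  | cons p t ih => cases p with | mk k v => by_cases h : k = w <;> simp [pvInnerAddN, pvInnerAdd, h, ih]

theorem pv_updN_one (cd : List (String × String × List (String × Int))) (k1 k2 w : String) :
    pvOuterUpdN cd k1 k2 w 1 = pvOuterUpd cd k1 k2 w := by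
  induction cd with
  | nil => simp [pvOuterUpdN, pvOuterUpd]
  | cons e t ih =>
    obtain ⟨a, b, inner⟩ := e
    by_cases h : a = k1 ∧ b = k2 <;> simp [pvOuterUpdN, pvOuterUpd, h, ih, pv_innerAddN_one]

theorem pv_inner_split (inner : List (String × Int)) (w : String) (c : Int) :
    pvInnerAdd (pvInnerAddN inner w c) w = pvInnerAddN inner w (c + 1) := by
  induction inner with
  | nil => simp [pvInnerAddN, pvInnerAdd]
  | cons p t ih =>
    cases p with | mk k v =>
    by_cases h : k = w <;> simp [pvInnerAddN, pvInnerAdd, h, ih]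
    ring

theorem pv_split (cd : List (String × String × List (String × Int))) (k1 k2 w : String) (c : Int) :
    pvOuterUpd (pvOuterUpdN cd k1 k2 w c) k1 k2 w = pvOuterUpdN cd k1 k2 w (c + 1) := by
  induction cd with
  | nil => simp [pvOuterUpdN, pvOuterUpd, pvInnerAdd]
  | cons e t ih =>
    obtain ⟨a, b, inner⟩ := e
    by_cases h : a = k1 ∧ b = k2 <;>
      simp [pvOuterUpdN, pvOuterUpd, h, ih, pv_inner_split]

theorem pv_any_innerAddN_self (inner : List (String × Int)) (w : String) (c : Int) :
    (pvInnerAddN inner w c).any (fun p => decide (p.1 = w)) = true := by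
  induction inner with
  | nil => simp [pvInnerAddN]
  | cons p t ih =>
    cases p with | mk k v =>
    by_cases h : k = w <;> simp [pvInnerAddN, h, ih]

theorem pv_any_innerAddN_mono (inner : List (String × Int)) (w v : String) (c : Int)
    (h : inner.any (fun p => decide (p.1 = w)) = true) :
    (pvInnerAddN inner v c).any (fun p => decide (p.1 = w)) = true := by
  induction inner with
  | nil => simp at h
  | cons p t ih =>
    obtain ⟨k, u⟩ := p
    simp only [List.any_cons, Bool.or_eq_true] at h
    by_cases hk : k = v
    · simp only [pvInnerAddN, if_pos hk, List.any_cons, Bool.or_eq_true]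
      exact h
    · simp only [pvInnerAddN, if_neg hk, List.any_cons, Bool.or_eq_true]
      rcases h with h1 | h1
      · exact Or.inl h1
      · exact Or.inr (ih h1)

theorem pv_inner_comm (inner : List (String × Int)) (w v : String) (c : Int)
    (hne : w ≠ v) (hw : inner.any (fun p => decide (p.1 = w)) = true) :
    pvInnerAddN (pvInnerAdd inner w) v c = pvInnerAdd (pvInnerAddN inner v c) w := by
  induction inner with
  | nil => simp at hw
  | cons p t ih =>
    obtain ⟨k, u⟩ := p
    by_cases hkw : k = w
    · have hkv : ¬ k = v := by intro hc; rw [hkw] at hc; exact hne hc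
      rw [show pvInnerAdd ((k, u) :: t) w = (k, u + 1) :: t from by simp [pvInnerAdd, hkw],
        show pvInnerAddN ((k, u + 1) :: t) v c = (k, u + 1) :: pvInnerAddN t v c from by
          simp [pvInnerAddN, hkv],
        show pvInnerAddN ((k, u) :: t) v c = (k, u) :: pvInnerAddN t v c from by
          simp [pvInnerAddN, hkv],
        show pvInnerAdd ((k, u) :: pvInnerAddN t v c) w = (k, u + 1) :: pvInnerAddN t v c from by
          simp [pvInnerAdd, hkw]]
    · by_cases hkv : k = v
      · rw [show pvInnerAdd ((k, u) :: t) w = (k, u) :: pvInnerAdd t w from by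
            simp [pvInnerAdd, hkw],
          show pvInnerAddN ((k, u) :: pvInnerAdd t w) v c = (k, u + c) :: pvInnerAdd t w from by
            simp [pvInnerAddN, hkv],
          show pvInnerAddN ((k, u) :: t) v c = (k, u + c) :: t from by simp [pvInnerAddN, hkv],
          show pvInnerAdd ((k, u + c) :: t) w = (k, u + c) :: pvInnerAdd t w from by
            simp [pvInnerAdd, hkw]]
      · simp only [List.any_cons, Bool.or_eq_true] at hw
        rcases hw with h1 | h1
        · exact absurd (by simpa using h1) hkw
        · rw [show pvInnerAdd ((k, u) :: t) w = (k, u) :: pvInnerAdd t w from by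
              simp [pvInnerAdd, hkw],
            show pvInnerAddN ((k, u) :: pvInnerAdd t w) v c
                = (k, u) :: pvInnerAddN (pvInnerAdd t w) v c from by simp [pvInnerAddN, hkv],
            show pvInnerAddN ((k, u) :: t) v c = (k, u) :: pvInnerAddN t v c from by
              simp [pvInnerAddN, hkv],
            show pvInnerAdd ((k, u) :: pvInnerAddN t v c) w
                = (k, u) :: pvInnerAdd (pvInnerAddN t v c) w from by simp [pvInnerAdd, hkw],
            ih h1]

theorem pv_has_updN_self (cd : List (String × String × List (String × Int)))
    (k : String × String × String) (c : Int) :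
    pvHas (pvOuterUpdN cd k.1 k.2.1 k.2.2 c) k = true := by
  induction cd with
  | nil => simp [pvOuterUpdN, pvHas]
  | cons e t ih =>
    obtain ⟨a, b, inner⟩ := e
    by_cases h : a = k.1 ∧ b = k.2.1
    · simp [pvOuterUpdN, pvHas, h, pv_any_innerAddN_self]
    · simp [pvOuterUpdN, pvHas, h, ih]

theorem pv_has_updN_mono (cd : List (String × String × List (String × Int)))
    (k : String × String × String) (a b v : String) (c : Int)
    (h : pvHas cd k = true) :
    pvHas (pvOuterUpdN cd a b v c) k = true := by
  induction cd with
  | nil => simp [pvHas] at h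
  | cons e t ih =>
    obtain ⟨e1, e2, inner⟩ := e
    by_cases hap : e1 = a ∧ e2 = b
    · rw [show pvOuterUpdN ((e1, e2, inner) :: t) a b v c
          = (e1, e2, pvInnerAddN inner v c) :: t from by simp [pvOuterUpdN, hap]]
      by_cases hxp : e1 = k.1 ∧ e2 = k.2.1
      · rw [pvHas, if_pos hxp] at h ⊢
        exact pv_any_innerAddN_mono inner k.2.2 v c h
      · rw [pvHas, if_neg hxp] at h ⊢
        exact h
    · rw [show pvOuterUpdN ((e1, e2, inner) :: t) a b v c
          = (e1, e2, inner) :: pvOuterUpdN t a b v c from by simp [pvOuterUpdN, hap]]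
      by_cases hxp : e1 = k.1 ∧ e2 = k.2.1
      · rw [pvHas, if_pos hxp] at h ⊢
        exact h
      · rw [pvHas, if_neg hxp] at h ⊢
        exact ih h

theorem pv_comm (cd : List (String × String × List (String × Int)))
    (k : String × String × String) (a b v : String) (c : Int)
    (hne : ¬ (k.1 = a ∧ k.2.1 = b ∧ k.2.2 = v))
    (hhas : pvHas cd k = true) :
    pvOuterUpdN (pvOuterUpd cd k.1 k.2.1 k.2.2) a b v c
      = pvOuterUpd (pvOuterUpdN cd a b v c) k.1 k.2.1 k.2.2 := by
  induction cd with
  | nil => simp [pvHas] at hhas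
  | cons e t ih =>
    obtain ⟨e1, e2, inner⟩ := e
    by_cases hxp : e1 = k.1 ∧ e2 = k.2.1
    · rw [pvHas, if_pos hxp] at hhas
      rw [show pvOuterUpd ((e1, e2, inner) :: t) k.1 k.2.1 k.2.2
          = (e1, e2, pvInnerAdd inner k.2.2) :: t from by
        simp only [pvOuterUpd]; rw [if_pos hxp]]
      by_cases hap : e1 = a ∧ e2 = b
      · have hwv : k.2.2 ≠ v := fun hc => hne ⟨hxp.1 ▸ hap.1, hxp.2 ▸ hap.2, hc⟩
        rw [show pvOuterUpdN ((e1, e2, pvInnerAdd inner k.2.2) :: t) a b v c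
            = (e1, e2, pvInnerAddN (pvInnerAdd inner k.2.2) v c) :: t from by
              simp only [pvOuterUpdN]; rw [if_pos hap],
          show pvOuterUpdN ((e1, e2, inner) :: t) a b v c
            = (e1, e2, pvInnerAddN inner v c) :: t from by
              simp only [pvOuterUpdN]; rw [if_pos hap],
          show pvOuterUpd ((e1, e2, pvInnerAddN inner v c) :: t) k.1 k.2.1 k.2.2
            = (e1, e2, pvInnerAdd (pvInnerAddN inner v c) k.2.2) :: t from by
              simp only [pvOuterUpd]; rw [if_pos hxp],
          pv_inner_comm inner k.2.2 v c hwv hhas]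
      · rw [show pvOuterUpdN ((e1, e2, pvInnerAdd inner k.2.2) :: t) a b v c
            = (e1, e2, pvInnerAdd inner k.2.2) :: pvOuterUpdN t a b v c from by
              simp only [pvOuterUpdN]; rw [if_neg hap],
          show pvOuterUpdN ((e1, e2, inner) :: t) a b v c
            = (e1, e2, inner) :: pvOuterUpdN t a b v c from by
              simp only [pvOuterUpdN]; rw [if_neg hap],
          show pvOuterUpd ((e1, e2, inner) :: pvOuterUpdN t a b v c) k.1 k.2.1 k.2.2
            = (e1, e2, pvInnerAdd inner k.2.2) :: pvOuterUpdN t a b v c from by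
              simp only [pvOuterUpd]; rw [if_pos hxp]]
    · rw [pvHas, if_neg hxp] at hhas
      rw [show pvOuterUpd ((e1, e2, inner) :: t) k.1 k.2.1 k.2.2
          = (e1, e2, inner) :: pvOuterUpd t k.1 k.2.1 k.2.2 from by
        simp only [pvOuterUpd]; rw [if_neg hxp]]
      by_cases hap : e1 = a ∧ e2 = b
      · rw [show pvOuterUpdN ((e1, e2, inner) :: pvOuterUpd t k.1 k.2.1 k.2.2) a b v c
            = (e1, e2, pvInnerAddN inner v c) :: pvOuterUpd t k.1 k.2.1 k.2.2 from by
              simp only [pvOuterUpdN]; rw [if_pos hap],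
          show pvOuterUpdN ((e1, e2, inner) :: t) a b v c
            = (e1, e2, pvInnerAddN inner v c) :: t from by
              simp only [pvOuterUpdN]; rw [if_pos hap],
          show pvOuterUpd ((e1, e2, pvInnerAddN inner v c) :: t) k.1 k.2.1 k.2.2
            = (e1, e2, pvInnerAddN inner v c) :: pvOuterUpd t k.1 k.2.1 k.2.2 from by
              simp only [pvOuterUpd]; rw [if_neg hxp]]
      · rw [show pvOuterUpdN ((e1, e2, inner) :: pvOuterUpd t k.1 k.2.1 k.2.2) a b v c
            = (e1, e2, inner) :: pvOuterUpdN (pvOuterUpd t k.1 k.2.1 k.2.2) a b v c from by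
              simp only [pvOuterUpdN]; rw [if_neg hap],
          show pvOuterUpdN ((e1, e2, inner) :: t) a b v c
            = (e1, e2, inner) :: pvOuterUpdN t a b v c from by
              simp only [pvOuterUpdN]; rw [if_neg hap],
          show pvOuterUpd ((e1, e2, inner) :: pvOuterUpdN t a b v c) k.1 k.2.1 k.2.2
            = (e1, e2, inner) :: pvOuterUpd (pvOuterUpdN t a b v c) k.1 k.2.1 k.2.2 from by
              simp only [pvOuterUpd]; rw [if_neg hxp],
          ih hhas]

theorem pv_foldl_comm (t : List ((String × String × String) × Int))
    (k : String × String × String)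
    (hk : ∀ p ∈ t, p.1 ≠ k) :
    ∀ cd, pvHas cd k = true →
      t.foldl (fun cd p => pvOuterUpdN cd p.1.1 p.1.2.1 p.1.2.2 p.2)
          (pvOuterUpd cd k.1 k.2.1 k.2.2)
        = pvOuterUpd (t.foldl (fun cd p => pvOuterUpdN cd p.1.1 p.1.2.1 p.1.2.2 p.2) cd)
            k.1 k.2.1 k.2.2 := by
  induction t with
  | nil => intro cd _; rfl
  | cons p t ih =>
    intro cd hhas
    have hp : p.1 ≠ k := hk p (by simp)
    have hne : ¬ (k.1 = p.1.1 ∧ k.2.1 = p.1.2.1 ∧ k.2.2 = p.1.2.2) := by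
      intro hcon
      apply hp
      obtain ⟨h1, h2, h3⟩ := hcon
      obtain ⟨q1, q2, q3⟩ := p.1
      obtain ⟨w1, w2, w3⟩ := k
      simp_all
    simp only [List.foldl_cons]
    rw [pv_comm cd k p.1.1 p.1.2.1 p.1.2.2 p.2 hne hhas]
    exact ih (fun q hq => hk q (by simp [hq])) _
      (pv_has_updN_mono cd k p.1.1 p.1.2.1 p.1.2.2 p.2 hhas)

theorem pv_bump_foldl (P : List ((String × String × String) × Int))
    (x : String × String × String)
    (hnd : (P.map Prod.fst).Nodup) :
    ∀ cd, (pvBump P x).foldl (fun cd p => pvOuterUpdN cd p.1.1 p.1.2.1 p.1.2.2 p.2) cd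
      = pvOuterUpd (P.foldl (fun cd p => pvOuterUpdN cd p.1.1 p.1.2.1 p.1.2.2 p.2) cd)
          x.1 x.2.1 x.2.2 := by
  induction P with
  | nil =>
    intro cd
    simp [pvBump, pv_updN_one]
  | cons p t ih =>
    intro cd
    obtain ⟨k, v⟩ := p
    simp only [List.map_cons, List.nodup_cons] at hnd
    by_cases hk : k = x
    · subst hk
      rw [show pvBump ((k, v) :: t) k = (k, v + 1) :: t from by simp [pvBump]]
      simp only [List.foldl_cons]
      show List.foldl (fun cd p => pvOuterUpdN cd p.1.1 p.1.2.1 p.1.2.2 p.2)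
          (pvOuterUpdN cd k.1 k.2.1 k.2.2 (v + 1)) t = _
      rw [show pvOuterUpdN cd k.1 k.2.1 k.2.2 (v + 1)
          = pvOuterUpd (pvOuterUpdN cd k.1 k.2.1 k.2.2 v) k.1 k.2.1 k.2.2 from
        (pv_split cd k.1 k.2.1 k.2.2 v).symm]
      exact pv_foldl_comm t k
        (fun q hq hcon => hnd.1 (hcon ▸ List.mem_map_of_mem hq)) _
        (pv_has_updN_self cd k v)
    · rw [show pvBump ((k, v) :: t) x = (k, v) :: pvBump t x from by simp [pvBump, hk]]
      simp only [List.foldl_cons]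
      exact ih hnd.2 _

theorem pv_modify_items (d : PySem.Dict (String × String × String) Int)
    (x : String × String × String)
    (hnd : (d.items.map Prod.fst).Nodup) :
    (d.modify x 0 (· + 1)).items = pvBump d.items x := by
  obtain ⟨P⟩ := d
  induction P with
  | nil =>
    simp [PySem.Dict.modify, PySem.Dict.insert, PySem.Dict.contains, PySem.Dict.getD,
      PySem.Dict.get?, pvBump]
  | cons p t ih =>
    obtain ⟨k, v⟩ := p
    simp only [List.map_cons, List.nodup_cons] at hnd
    have ihs := ih hnd.2
    by_cases hk : k = x
    · subst hk
      have hnotin : ∀ p ∈ t, (p.1 == k) = false := by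
        intro p hp
        simp only [beq_eq_false_iff_ne, ne_eq]
        intro hcon
        exact hnd.1 (hcon ▸ List.mem_map_of_mem hp)
      show (PySem.Dict.insert ⟨(k, v) :: t⟩ k ((PySem.Dict.getD ⟨(k, v) :: t⟩ k 0) + 1)).items
        = pvBump ((k, v) :: t) k
      rw [show PySem.Dict.getD ⟨(k, v) :: t⟩ k 0 = v from by
          simp [PySem.Dict.getD, PySem.Dict.get?, List.find?_cons_of_pos],
        show pvBump ((k, v) :: t) k = (k, v + 1) :: t from by simp [pvBump],
        PySem.Dict.insert,
        show PySem.Dict.contains ⟨(k, v) :: t⟩ k = true from by simp [PySem.Dict.contains]]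
      simp only [if_true, List.map_cons, beq_self_eq_true]
      show (k, v + 1) :: List.map (fun p => if (p.1 == k) = true then (k, v + 1) else p) t
        = (k, v + 1) :: t
      congr 1
      have hid : ∀ p ∈ t, (if (p.1 == k) = true then (k, v + 1) else p) = p := by
        intro p hp
        rw [hnotin p hp]
        simp
      rw [List.map_congr_left hid]
      simp
    · have hbeq : (k == x) = false := by simp [hk]
      show (PySem.Dict.insert ⟨(k, v) :: t⟩ x ((PySem.Dict.getD ⟨(k, v) :: t⟩ x 0) + 1)).items
        = pvBump ((k, v) :: t) x
      rw [show PySem.Dict.getD ⟨(k, v) :: t⟩ x 0 = PySem.Dict.getD ⟨t⟩ x 0 from by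
          simp [PySem.Dict.getD, PySem.Dict.get?, List.find?_cons_of_neg, hbeq],
        show pvBump ((k, v) :: t) x = (k, v) :: pvBump t x from by simp [pvBump, hk]]
      simp only [PySem.Dict.modify] at ihs
      by_cases hc : PySem.Dict.contains (⟨t⟩ : PySem.Dict (String × String × String) Int) x = true
      · rw [PySem.Dict.insert,
          show PySem.Dict.contains ⟨(k, v) :: t⟩ x = true from by
            simpa [PySem.Dict.contains, List.any_cons, hbeq] using hc]
        simp only [if_true, List.map_cons, hbeq, Bool.false_eq_true, if_false]
        rw [PySem.Dict.insert, hc] at ihs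
        simp only [if_true] at ihs
        exact congrArg _ ihs
      · have hc' : PySem.Dict.contains (⟨t⟩ : PySem.Dict (String × String × String) Int) x = false :=
          Bool.eq_false_iff.mpr hc
        rw [PySem.Dict.insert,
          show PySem.Dict.contains ⟨(k, v) :: t⟩ x = false from by
            simpa [PySem.Dict.contains, List.any_cons, hbeq] using hc']
        simp only [Bool.false_eq_true, if_false]
        rw [PySem.Dict.insert, hc'] at ihs
        simp only [Bool.false_eq_true, if_false] at ihs
        show (k, v) :: (t ++ [(x, PySem.Dict.getD ⟨t⟩ x 0 + 1)]) = (k, v) :: pvBump t x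
        rw [← ihs]

theorem pv_counter_foldl (L : List (String × String × String)) :
    ∀ cd, (PySem.Dict.counter L).items.foldl
        (fun cd p => pvOuterUpdN cd p.1.1 p.1.2.1 p.1.2.2 p.2) cd
      = L.foldl (fun cd k => pvOuterUpd cd k.1 k.2.1 k.2.2) cd := by
  induction L using List.reverseRecOn with
  | nil => intro cd; rfl
  | append_singleton L x ih =>
    intro cd
    have hnd : ((PySem.Dict.counter L).items.map Prod.fst).Nodup := by
      have := PySem.Dict.nodup_keys_counter L
      simpa [PySem.Dict.keys] using this
    rw [PySem.Dict.counter_append_singleton, pv_modify_items _ x hnd,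
      pv_bump_foldl _ x hnd cd, ih cd, List.foldl_append]
    rfl

theorem pv_gen_eq_map (words : List String) :
    pvGenerateNgrams words 3 =
      (List.range (words.length - 2)).map (fun k => (words.drop k).take 3) := by
  unfold pvGenerateNgrams
  rw [PySem.List.foldl_append_singleton_eq_map, List.nil_append, PySem.List.pyRange_one]
  have hn : (((words.length : Int) - (3 - 1)) - 0).toNat = words.length - 2 := by omega
  rw [hn]
  rw [List.map_map]
  apply List.map_congr_left
  intro k _
  show PySem.List.slice words (some ((0 : Int) + (k : Int))) (some (((0 : Int) + (k : Int)) + 3)) = _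
  have h3 : ((0 : Int) + (k : Int)) + 3 = (k : Int) + ((3 : Nat) : Int) := by push_cast; ring
  rw [h3]
  have h0 : (0 : Int) + (k : Int) = ((k : Nat) : Int) := by ring
  rw [h0, PySem.List.slice_natCast_add]

theorem pv_range_take_eq_triples {α : Type} :
    ∀ (xs : List α),
      (List.range (xs.length - 2)).map (fun k => (xs.drop k).take 3) =
        (pvTriples xs).map (fun t => [t.1, t.2.1, t.2.2]) := by
  intro xs
  induction xs with
  | nil => rfl
  | cons a tl ih =>
    match tl with
    | [] => rfl
    | [b] => rfl
    | b :: c :: rest =>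
      have hlen : (a :: b :: c :: rest).length - 2 = (rest.length + 2) - 2 + 1 := by
        simp [List.length]
      rw [hlen, List.range_succ_eq_map, List.map_cons, List.map_map]
      have htail := ih
      simp only [pvTriples] at htail ⊢
      simp only [List.drop, List.zip_cons_cons, List.map_cons]
      congr 1

theorem pv_triples_map {α β : Type} (f : α → β) (xs : List α) :
    pvTriples (xs.map f) = (pvTriples xs).map (fun t => (f t.1, f t.2.1, f t.2.2)) := by
  unfold pvTriples
  rw [← List.map_drop, ← List.map_drop, List.zip_map, List.zip_map]
  apply List.map_congr_left
  rintro ⟨x, y, z⟩ _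
  rfl

theorem pv_keylist_eq (m : List String) :
    (List.range (m.length - 2)).map
        (fun i => (m.getD (i + 1) "", m.getD i "", m.getD (i + 2) "")) = pvTriKeys m := by
  apply List.ext_getElem
  · simp [pvTriKeys, pvTriples]
    omega
  · intro i h1 h2
    simp only [List.length_map, List.length_range] at h1
    have hm : i + 2 < m.length := by omega
    simp only [List.getElem_map, List.getElem_range, pvTriKeys, pvTriples,
      List.getElem_zip, List.getElem_drop]
    rw [List.getD_eq_getElem m "" (by omega), List.getD_eq_getElem m "" (by omega),
      List.getD_eq_getElem m "" (by omega)]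
    simp only [show 1 + i = i + 1 from by omega, show 2 + i = i + 2 from by omega]

theorem pv_freq_eq (m : List String) :
    (PySem.List.pyRange 0 ((m.length : Int) - 2) 1).foldl
        (fun d i =>
          let key := (PySem.List.pyGetD m (i + 1) "", PySem.List.pyGetD m i "",
                      PySem.List.pyGetD m (i + 2) "")
          d.insert key (d.getD key 0 + 1))
        PySem.Dict.empty
      = PySem.Dict.counter (pvTriKeys m) := by
  rw [PySem.List.pyRange_one]
  have hn : (((m.length : Int) - 2) - 0).toNat = m.length - 2 := by omega
  rw [hn, List.foldl_map, ← pv_keylist_eq, ← PySem.Dict.foldl_insert_getD_add_one_eq_counter,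
    List.foldl_map]
  apply PySem.List.foldl_congr_mem
  intro d k hk
  have e0 : (0 : Int) + (k : Int) = ((k : Nat) : Int) := by omega
  have e1 : ((k : Nat) : Int) + 1 = (((k + 1) : Nat) : Int) := by push_cast; ring
  have e2 : ((k : Nat) : Int) + 2 = (((k + 2) : Nat) : Int) := by push_cast; ring
  simp only [e0]
  simp only [e1, e2, PySem.List.pyGetD_natCast]

theorem pv_alt_eq (words unk_words : List String)
    (count_dict : List (String × String × List (String × Int))) :
    get_trigram_count_py_alt words unk_words count_dict =
      (pvTriKeys (words.map (fun w => if w ∈ unk_words then "<UNK>" else w))).foldl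
        (fun cd k => pvOuterUpd cd k.1 k.2.1 k.2.2) count_dict := by
  show ((PySem.List.pyRange 0 (((words.map (fun w => if w ∈ unk_words then "<UNK>" else w)).length : Int) - 2) 1).foldl
        (fun d i =>
          let key := (PySem.List.pyGetD (words.map (fun w => if w ∈ unk_words then "<UNK>" else w)) (i + 1) "",
                      PySem.List.pyGetD (words.map (fun w => if w ∈ unk_words then "<UNK>" else w)) i "",
                      PySem.List.pyGetD (words.map (fun w => if w ∈ unk_words then "<UNK>" else w)) (i + 2) "")
          d.insert key (d.getD key 0 + 1))
        PySem.Dict.empty).items.foldl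
      (fun cd p => pvOuterUpdN cd p.1.1 p.1.2.1 p.1.2.2 p.2) count_dict = _
  rw [pv_freq_eq, pv_counter_foldl]

-- ===== VERDICT (by name: the statement is the Claim_ definition above) =====
theorem get_trigram_count_py_spec : Claim_equal_get_trigram_count_py := by
  intro words unk_words count_dict _
  unfold Spec_get_trigram_count_py
  unfold get_trigram_count_py
  rw [pv_gen_eq_map, pv_range_take_eq_triples, pv_alt_eq, pvTriKeys, pv_triples_map,
    List.foldl_map, List.foldl_map, List.foldl_map]
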